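-- pv_equiv track=rewrite | github.com/retrogradeMT/kryptos | skip.py | skip_decrypt
-- ===== SOURCE A (Python) =====
-- def skip_decrypt(cipher: str, skip: int, start_pos_1idx: int) -> str | None:
--     """
--     dCode-style decryption:
--       plaintext[pos] = ciphertext[i], where pos = (start + i*skip) mod N
--     start_pos_1idx is 1-indexed; convert to 0-index internally.
--
--     Returns the plaintext string if all positions are filled exactly once.
--     If the walk revisits a position early (non-coprime case), returns None.
--     """
--     N = len(cipher)
--     if N == 0:
--         return ""
--
--     # 1-indexed -> 0-indexed start
--     start0 = (start_pos_1idx - 1) % N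
--     plain = [''] * N
--     seen = set()
--
--     pos = start0
--     for i, ch in enumerate(cipher):
--         if pos in seen:
--             # We revisited before placing N chars => gcd(skip, N) != 1; cannot reconstruct fully from one cycle.
--             return None
--         plain[pos] = ch
--         seen.add(pos)
--         pos = (pos + skip) % N
--
--     # All positions filled?
--     if len(seen) != N:
--         return None
--
--     return ''.join(plain)
-- ===== SOURCE B (Python) =====
-- import math
--
-- def skip_decrypt(cipher: str, skip: int, start_pos_1idx: int) -> str | None:
--     """Closed-form version: the skip walk covers all N positions exactly once
--     iff gcd(skip, N) == 1, so test coprimality once instead of tracking a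
--     'seen' set, then scatter the ciphertext in a single pass."""
--     N = len(cipher)
--     if N == 0:
--         return ""
--     if math.gcd(skip, N) != 1:
--         return None
--     start0 = (start_pos_1idx - 1) % N
--     plain = [''] * N
--     for i, ch in enumerate(cipher):
--         plain[(start0 + i * skip) % N] = ch
--     return ''.join(plain)
-- ===== Notes on version B (the rewrite author's own statement) =====
-- stated objective: simpler
-- what changed: Replaces A's iterative revisit detection (a 'seen' set, an incrementally stepped position, an early return and a final fill-count check) with a single closed-form gcd(skip, N) == 1 coprimality test, then scatters each ciphertext character directly to its computed position (start0 + i*skip) % N in one pass.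
import Mathlib
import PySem

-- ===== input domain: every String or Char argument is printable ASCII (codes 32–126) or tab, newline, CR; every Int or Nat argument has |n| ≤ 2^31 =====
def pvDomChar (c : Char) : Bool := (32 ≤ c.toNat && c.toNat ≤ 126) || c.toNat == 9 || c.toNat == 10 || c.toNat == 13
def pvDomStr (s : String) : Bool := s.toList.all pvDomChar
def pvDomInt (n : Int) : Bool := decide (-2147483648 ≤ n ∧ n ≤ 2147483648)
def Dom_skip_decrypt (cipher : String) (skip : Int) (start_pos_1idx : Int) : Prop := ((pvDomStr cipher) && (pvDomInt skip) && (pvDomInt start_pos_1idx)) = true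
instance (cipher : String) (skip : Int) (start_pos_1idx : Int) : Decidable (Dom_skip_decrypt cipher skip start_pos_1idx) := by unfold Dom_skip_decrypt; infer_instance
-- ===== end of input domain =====

-- B replaces A's per-step 'seen'-set revisit detection by a single closed-form
-- gcd(skip, N) = 1 coprimality test and a direct scatter of the ciphertext (objective: simpler).


-- ===== PORT A =====
-- A's for-loop over enumerate(cipher): state (plain, seen, pos), early 'return None' on revisit.
def skip_loopA (skipv N : Int) : List Char → List (List Char) → PySem.Set Int → Int →
    Option (List (List Char) × PySem.Set Int)
  | [], plain, seen, _ => some (plain, seen)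
  | ch :: rest, plain, seen, pos =>
    if PySem.Set.contains seen pos then none
    else skip_loopA skipv N rest (PySem.List.pySetD plain pos [ch]) (PySem.Set.add seen pos)
      (PySem.Int.mod (pos + skipv) N)

def skip_decrypt (cipher : String) (skip : Int) (start_pos_1idx : Int) : Option String :=
  let L := cipher.toList
  let N : Int := (L.length : Int)
  if L.length = 0 then some "" else
    let start0 := PySem.Int.mod (start_pos_1idx - 1) N
    match skip_loopA skip N L (List.replicate L.length []) PySem.Set.empty start0 with
    | none => none
    | some (plain, seen) =>
      if PySem.Set.len seen ≠ N then none
      else some (String.ofList plain.flatten)   -- ''.join(plain); entries are '' or one char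

-- ===== PORT B =====
def skip_decrypt_alt (cipher : String) (skip : Int) (start_pos_1idx : Int) : Option String :=
  let L := cipher.toList
  let N : Int := (L.length : Int)
  if L.length = 0 then some ""
  else if Int.gcd skip N ≠ 1 then none   -- math.gcd(skip, N) != 1
  else
    let start0 := PySem.Int.mod (start_pos_1idx - 1) N
    let plain := (PySem.List.enumerate L 0).foldl
      (fun pl ic => PySem.List.pySetD pl (PySem.Int.mod (start0 + ic.1 * skip) N) [ic.2])
      (List.replicate L.length [])
    some (String.ofList plain.flatten)   -- ''.join(plain)

-- ===== PRECONDITION & SPEC =====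
def Spec_skip_decrypt (cipher : String) (skip : Int) (start_pos_1idx : Int) (out : Option String) : Prop := out = skip_decrypt_alt cipher skip start_pos_1idx
instance (cipher : String) (skip : Int) (start_pos_1idx : Int) (out : Option String) : Decidable (Spec_skip_decrypt cipher skip start_pos_1idx out) := by unfold Spec_skip_decrypt; infer_instance

-- ===== CLAIM (what is proved, stated in full; the proofs are below) =====
def Claim_equal_skip_decrypt : Prop := ∀ (cipher : String) (skip : Int) (start_pos_1idx : Int), Dom_skip_decrypt cipher skip start_pos_1idx → Spec_skip_decrypt cipher skip start_pos_1idx (skip_decrypt cipher skip start_pos_1idx)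

-- ===== LEMMAS AND PROOFS =====

def pvPos (s0 k N : Int) (i : ℕ) : Int := (s0 + i * k) % N
lemma pvPos_step (s0 k N : Int) (i : ℕ) : (pvPos s0 k N i + k) % N = pvPos s0 k N (i + 1) := by
  unfold pvPos; rw [Int.emod_add_emod]; push_cast; ring_nf
lemma set_add_snoc (xs : List Int) (x : Int) :
    PySem.Set.add (PySem.Set.ofList xs) x = PySem.Set.ofList (xs ++ [x]) := by
  simp [PySem.Set.ofList, List.foldl_append]
lemma contains_ofList_iff (xs : List Int) (x : Int) :
    PySem.Set.contains (PySem.Set.ofList xs) x = true ↔ x ∈ xs := by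
  simp [PySem.Set.contains, PySem.Set.mem_ofList]

lemma map_range_snoc (f : ℕ → Int) (t : ℕ) :
    (List.range t).map f ++ [f t] = (List.range (t + 1)).map f := by
  rw [List.range_succ, List.map_append, List.map_singleton]

lemma loop_ok (k N s0 : Int) (hN : 0 < N)
    (hinj : ∀ i j : ℕ, (i : Int) < N → (j : Int) < N → pvPos s0 k N i = pvPos s0 k N j → i = j) :
    ∀ (cs : List Char) (t : ℕ) (plain : List (List Char)), (t : Int) + cs.length ≤ N →
    skip_loopA k N cs plain (PySem.Set.ofList ((List.range t).map (pvPos s0 k N))) (pvPos s0 k N t)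
      = some ((PySem.List.enumerate cs (t : Int)).foldl
          (fun pl ic => PySem.List.pySetD pl (PySem.Int.mod (s0 + ic.1 * k) N) [ic.2]) plain,
        PySem.Set.ofList ((List.range (t + cs.length)).map (pvPos s0 k N))) := by
  intro cs
  induction cs with
  | nil => intro t plain _; simp [skip_loopA, PySem.List.enumerate]
  | cons c rest ih =>
    intro t plain hle
    have htN : (t : Int) < N := by simp at hle; omega
    have hnotmem : pvPos s0 k N t ∉ (List.range t).map (pvPos s0 k N) := by
      intro hmem
      obtain ⟨j, hj, heq⟩ := List.mem_map.mp hmem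
      have hjt := List.mem_range.mp hj
      have : j = t := hinj j t (by omega) htN heq
      omega
    rw [skip_loopA]
    rw [if_neg (by rw [contains_ofList_iff]; exact hnotmem)]
    rw [set_add_snoc, map_range_snoc]
    rw [PySem.Int.mod_eq_emod_of_pos hN, pvPos_step]
    have hrec := ih (t + 1) (PySem.List.pySetD plain (pvPos s0 k N t) [c])
      (by simp at hle ⊢; omega)
    rw [hrec]
    simp only [PySem.List.enumerate, List.foldl_cons]
    rw [PySem.Int.mod_eq_emod_of_pos hN]
    have : (s0 + (t : Int) * k) % N = pvPos s0 k N t := rfl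
    rw [this]
    push_cast
    ring_nf
    have hlen : 1 + t + rest.length = t + (c :: rest).length := by
      simp [List.length_cons]; omega
    rw [hlen]

lemma loop_fail (k N s0 : Int) (hN : 0 < N) :
    ∀ (cs : List Char) (t : ℕ) (plain : List (List Char)),
    (∃ i j : ℕ, t ≤ i ∧ i < t + cs.length ∧ j < i ∧ pvPos s0 k N j = pvPos s0 k N i) →
    skip_loopA k N cs plain (PySem.Set.ofList ((List.range t).map (pvPos s0 k N))) (pvPos s0 k N t)
      = none := by
  intro cs
  induction cs with
  | nil => rintro t plain ⟨i, j, h1, h2, -, -⟩; simp at h2; omega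
  | cons c rest ih =>
    rintro t plain ⟨i, j, h1, h2, hji, heq⟩
    rw [skip_loopA]
    by_cases hc : PySem.Set.contains (PySem.Set.ofList ((List.range t).map (pvPos s0 k N))) (pvPos s0 k N t) = true
    · rw [if_pos hc]
    · rw [if_neg hc]
      have hnot : pvPos s0 k N t ∉ (List.range t).map (pvPos s0 k N) := fun h => hc ((contains_ofList_iff _ _).mpr h)
      have hit : t < i := by
        rcases Nat.lt_or_ge t i with h | h
        · exact h
        · exfalso
          have : i = t := by omega
          subst this
          exact hnot (List.mem_map.mpr ⟨j, List.mem_range.mpr hji, heq⟩)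
      rw [set_add_snoc, map_range_snoc, PySem.Int.mod_eq_emod_of_pos hN, pvPos_step]
      exact ih (t + 1) _ ⟨i, j, by omega, by simp at h2 ⊢; omega, hji, heq⟩


lemma ports_eq (cipher : String) (skip start_pos_1idx : Int) :
    skip_decrypt cipher skip start_pos_1idx = skip_decrypt_alt cipher skip start_pos_1idx := by
  unfold skip_decrypt skip_decrypt_alt
  by_cases h0 : cipher.toList.length = 0
  · simp [h0]
  · have hn : 0 < cipher.toList.length := Nat.pos_of_ne_zero h0
    have hN : (0:Int) < (cipher.toList.length : Int) := by exact_mod_cast hn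
    simp only [h0, if_false]
    generalize hLdef : cipher.toList = L at *
    generalize hs0def : PySem.Int.mod (start_pos_1idx - 1) (L.length : Int) = s0
    have hs0 : pvPos s0 skip (L.length : Int) 0 = s0 := by
      simp only [pvPos, Nat.cast_zero, zero_mul, add_zero]
      rw [← hs0def, PySem.Int.mod_eq_emod_of_pos hN, Int.emod_emod_of_dvd _ dvd_rfl]
    by_cases hg : Int.gcd skip (L.length : Int) = 1
    · -- coprime: the walk is injective, A succeeds and fills every cell
      have hinj : ∀ i j : ℕ, (i : Int) < (L.length : Int) → (j : Int) < (L.length : Int) →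
          pvPos s0 skip (L.length : Int) i = pvPos s0 skip (L.length : Int) j → i = j := by
        intro i j hi hj heq
        unfold pvPos at heq
        have hz := Int.emod_eq_emod_iff_emod_sub_eq_zero.mp heq
        have hdvd : (L.length : Int) ∣ ((i:ℤ) - j) * skip := by
          have := Int.dvd_of_emod_eq_zero hz
          have hrw : s0 + (i:ℤ) * skip - (s0 + (j:ℤ) * skip) = ((i:ℤ) - j) * skip := by ring
          rwa [hrw] at this
        have hcop : IsCoprime ((L.length : Int)) skip := by
          rw [Int.isCoprime_iff_gcd_eq_one, Int.gcd_comm]; exact hg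
        have hdvd2 : (L.length : Int) ∣ (i:ℤ) - j := hcop.dvd_of_dvd_mul_right hdvd
        have habs : |(i:ℤ) - j| < (L.length : Int) := abs_sub_lt_iff.mpr ⟨by omega, by omega⟩
        have := Int.eq_zero_of_abs_lt_dvd hdvd2 habs
        omega
      have hloop := loop_ok skip (L.length : Int) s0 hN hinj L 0 (List.replicate L.length [])
        (by simp)
      rw [hs0] at hloop
      have hempty : PySem.Set.ofList ((List.range 0).map (pvPos s0 skip (L.length : Int)))
          = PySem.Set.empty := rfl
      rw [hempty] at hloop
      rw [hloop]
      have hnodup : ((List.range L.length).map (pvPos s0 skip (L.length : Int))).Nodup := by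
        refine List.Nodup.map_on ?_ (List.nodup_range)
        intro x hx y hy hxy
        exact hinj x y (by exact_mod_cast List.mem_range.mp hx)
          (by exact_mod_cast List.mem_range.mp hy) hxy
      have hlen : PySem.Set.len (PySem.Set.ofList
          ((List.range L.length).map (pvPos s0 skip (L.length : Int)))) = (L.length : Int) := by
        rw [PySem.Set.ofList_eq_self_of_nodup _ hnodup]
        simp [PySem.Set.len]
      simp only [zero_add]
      rw [if_neg (by rw [hlen]; simp)]
      rw [if_neg (by simp [hg])]
      norm_num
    · -- non-coprime: the walk revisits position 0 after n / g steps
      rw [if_pos (by simpa using hg)]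
      set g : ℕ := Int.gcd skip (L.length : Int) with hgdef
      have hgn : g ∣ L.length := by
        have := Int.gcd_dvd_right (a := skip) (b := (L.length : Int))
        exact_mod_cast this
      have hgpos : 0 < g := by
        rcases Nat.eq_zero_or_pos g with h | h
        · exfalso
          rw [h] at hgn
          have := Nat.eq_zero_of_zero_dvd hgn
          omega
        · exact h
      have hg2 : 2 ≤ g := by omega
      have hile : g ≤ L.length := Nat.le_of_dvd hn hgn
      have hipos : 0 < L.length / g := Nat.div_pos hile hgpos
      have hilt : L.length / g < L.length := Nat.div_lt_self hn hg2
      have peq : pvPos s0 skip (L.length : Int) 0 = pvPos s0 skip (L.length : Int) (L.length / g) := by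
        obtain ⟨m, hm⟩ := Int.gcd_dvd_left (a := skip) (b := (L.length : Int))
        have hig : ((L.length / g : ℕ) : ℤ) * g = (L.length : Int) := by
          exact_mod_cast congrArg (Nat.cast : ℕ → ℤ) (Nat.div_mul_cancel hgn)
        unfold pvPos
        rw [← hgdef] at hm
        have : s0 + ((L.length / g : ℕ) : ℤ) * skip
            = s0 + (L.length : Int) * m := by
          rw [hm, ← mul_assoc, hig]
        rw [this]
        simp [Int.add_mul_emod_self_left]
      have hfail := loop_fail skip (L.length : Int) s0 hN L 0 (List.replicate L.length [])
        ⟨L.length / g, 0, by omega, by omega, hipos, peq⟩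
      rw [hs0] at hfail
      have hempty : PySem.Set.ofList ((List.range 0).map (pvPos s0 skip (L.length : Int)))
          = PySem.Set.empty := rfl
      rw [hempty] at hfail
      rw [hfail]

-- ===== VERDICT (by name: the statement is the Claim_ definition above) =====
theorem skip_decrypt_spec : Claim_equal_skip_decrypt := by
  intro cipher skip start_pos_1idx _
  exact ports_eq cipher skip start_pos_1idx
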